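-- pv_equiv track=rewrite | github.com/emgarten/azure-iot-scale | src/locust_pkg/utils.py | parse_request_id_from_topic
-- ===== SOURCE A (Python) =====
-- def parse_request_id_from_topic(topic: str) -> str | None:
--     """Parse the request ID ($rid) from an IoT Hub MQTT topic.
--
--     Extracts the $rid parameter from topics like:
--     - $iothub/credentials/res/202/?$rid=66641568
--     - $iothub/credentials/res/200/?$rid=550e8400-e29b-41d4-a716-446655440000&$version=1
--
--     Args:
--         topic: MQTT topic string
--
--     Returns:
--         The request ID as a string, or None if not found.
--     """
--     parts = topic.split("/")
--     if len(parts) < 5: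
--         return None
--
--     query_part = parts[4]  # e.g., "?$rid=550e8400-e29b-41d4-a716-446655440000&$version=1"
--     if query_part.startswith("?"):
--         query_part = query_part[1:]
--
--     for param in query_part.split("&"):
--         if param.startswith("$rid="):
--             rid_value = param[5:]
--             return rid_value if rid_value else None
--
--     return None
-- ===== SOURCE B (Python) =====
-- def parse_request_id_from_topic(topic: str) -> str | None:
--     """Cursor-advance scan for an anchored '$rid=' instead of splitting the query on '&'."""
--     parts = topic.split("/")
--     if len(parts) < 5:
--         return None
--
--     q = parts[4]
--     if q.startswith("?"):
--         q = q[1:]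
--
--     while True:
--         if q.startswith("$rid="):
--             v = q[5:]
--             end = 0
--             while end < len(v) and v[end] != "&":
--                 end += 1
--             return v[:end] or None
--         amp = q.find("&")
--         if amp == -1:
--             return None
--         q = q[amp + 1:]
-- ===== Notes on version B (the rewrite author's own statement) =====
-- stated objective: alternative
-- what changed: The '&'-split plus for-loop over parameters is replaced by a single cursor-advance scan over the query string: check an anchored '$rid=' prefix at the current parameter start, take the value up to the next '&', otherwise jump past the next '&'; no list of parameters is ever built.
import Mathlib
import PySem

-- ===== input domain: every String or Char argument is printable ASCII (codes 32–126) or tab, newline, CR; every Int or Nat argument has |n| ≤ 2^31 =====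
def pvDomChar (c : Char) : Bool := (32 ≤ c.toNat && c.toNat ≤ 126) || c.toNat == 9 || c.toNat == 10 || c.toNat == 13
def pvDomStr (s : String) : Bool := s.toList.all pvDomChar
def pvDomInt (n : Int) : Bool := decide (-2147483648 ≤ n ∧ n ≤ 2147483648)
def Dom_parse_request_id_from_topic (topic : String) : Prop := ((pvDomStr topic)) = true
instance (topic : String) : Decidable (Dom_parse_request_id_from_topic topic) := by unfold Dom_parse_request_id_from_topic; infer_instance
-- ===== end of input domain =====

-- B replaces A's '&'-split + loop over the parameter list by a cursor scan over the
-- query chars (anchored '$rid=' prefix check, value = chars up to next '&'); alternative, same cost.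


-- ===== PORT A =====
-- for param in query_part.split("&"): if param.startswith("$rid="): return param[5:] or None
def pvALoop : List (List Char) → Option (List Char)
  | [] => none
  | p :: rest =>
    if PySem.Chars.startswith p ['$', 'r', 'i', 'd', '='] then
      let v := p.drop 5          -- param[5:] (nonnegative slice = drop, exact)
      if v = [] then none else some v
    else pvALoop rest

def parse_request_id_from_topic (topic : String) : Option String :=
  let parts := PySem.Chars.splitOn topic.toList ['/']
  if parts.length < 5 then none
  else
    let q0 := (PySem.List.pyGet? parts 4).getD []   -- parts[4]; in range since parts.length ≥ 5
    let q := if PySem.Chars.startswith q0 ['?'] then q0.drop 1 else q0  -- query_part[1:]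
    (pvALoop (PySem.Chars.splitOn q ['&'])).map String.ofList

-- ===== PORT B =====
-- cursor scan: at a parameter start, test the '$rid=' prefix; the value-collecting
-- while loop is takeWhile (≠ '&'); q[q.find('&')+1:] (find ≠ -1) is the tail of
-- dropWhile (≠ '&') — exact: find('&') is the index of the first '&'.
def pvBGo (cs : List Char) : Option (List Char) :=
  if PySem.Chars.startswith cs ['$', 'r', 'i', 'd', '='] then
    let v := (cs.drop 5).takeWhile (· != '&')
    if v = [] then none else some v
  else
    match h : cs.dropWhile (· != '&') with
    | [] => none
    | _ :: rest => pvBGo rest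
termination_by cs.length
decreasing_by
  have hle := List.length_dropWhile_le (fun c => c != '&') cs
  rw [h] at hle
  simpa using Nat.lt_of_lt_of_le (Nat.lt_succ_self _) (by simpa using hle)

def parse_request_id_from_topic_alt (topic : String) : Option String :=
  let parts := PySem.Chars.splitOn topic.toList ['/']
  if parts.length < 5 then none
  else
    let q0 := (PySem.List.pyGet? parts 4).getD []   -- parts[4]; in range since parts.length ≥ 5
    let q := if PySem.Chars.startswith q0 ['?'] then q0.drop 1 else q0  -- q[1:]
    (pvBGo q).map String.ofList

-- ===== PRECONDITION & SPEC =====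
def Spec_parse_request_id_from_topic (topic : String) (out : Option String) : Prop := out = parse_request_id_from_topic_alt topic
instance (topic : String) (out : Option String) : Decidable (Spec_parse_request_id_from_topic topic out) := by unfold Spec_parse_request_id_from_topic; infer_instance

-- ===== CLAIM (what is proved, stated in full; the proofs are below) =====
def Claim_equal_parse_request_id_from_topic : Prop := ∀ (topic : String), Dom_parse_request_id_from_topic topic → Spec_parse_request_id_from_topic topic (parse_request_id_from_topic topic)

-- ===== LEMMAS AND PROOFS =====

-- characterisation of PySem's splitOn with the single-char separator '&'
theorem pv_go_amp (l : List Char) : ∀ (fuel : Nat) (cur : List Char) (acc : List (List Char)),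
    l.length ≤ fuel →
    PySem.Chars.splitOn.go ['&'] fuel l cur acc =
      acc.reverse ++ (cur.reverse ++ l.takeWhile (· != '&')) ::
        (match l.dropWhile (· != '&') with
         | [] => []
         | _ :: rest => PySem.Chars.splitOn rest ['&']) := by
  induction l with
  | nil =>
    intro fuel cur acc _
    cases fuel <;> simp [PySem.Chars.splitOn.go]
  | cons c rest ih =>
    intro fuel cur acc hlen
    cases fuel with
    | zero => simp at hlen
    | succ fuel =>
      by_cases hc : c = '&'
      · subst hc
        rw [show PySem.Chars.splitOn.go ['&'] (fuel+1) ('&'::rest) cur acc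
              = PySem.Chars.splitOn.go ['&'] fuel rest [] (cur.reverse :: acc) by
            simp [PySem.Chars.splitOn.go, List.isPrefixOf]]
        have hrest : PySem.Chars.splitOn rest ['&'] =
            List.takeWhile (fun x => x != '&') rest ::
              (match List.dropWhile (fun x => x != '&') rest with
               | [] => []
               | _ :: r => PySem.Chars.splitOn r ['&']) := by
          rw [PySem.Chars.splitOn, ih (rest.length + 1) [] [] (by omega)]
          simp
        rw [ih fuel [] (cur.reverse :: acc) (by simpa using Nat.le_of_succ_le_succ hlen)]
        simp [hrest]
      · rw [show PySem.Chars.splitOn.go ['&'] (fuel+1) (c::rest) cur acc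
              = PySem.Chars.splitOn.go ['&'] fuel rest (c :: cur) acc by
            simp [PySem.Chars.splitOn.go, List.isPrefixOf]
            exact fun h => absurd h.symm hc]
        rw [ih fuel (c :: cur) acc (by simpa using Nat.le_of_succ_le_succ hlen)]
        simp [hc]

theorem pv_splitOn_amp (cs : List Char) :
    PySem.Chars.splitOn cs ['&'] =
      cs.takeWhile (· != '&') ::
        (match cs.dropWhile (· != '&') with
         | [] => []
         | _ :: rest => PySem.Chars.splitOn rest ['&']) := by
  rw [PySem.Chars.splitOn, pv_go_amp cs (cs.length + 1) [] [] (by omega)]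
  simp

-- A's loop over the '&'-split pieces equals B's cursor scan
theorem pv_key (q : List Char) : pvALoop (PySem.Chars.splitOn q ['&']) = pvBGo q := by
  induction q using pvBGo.induct with
  | case1 cs h =>
    rw [pv_splitOn_amp]
    rw [PySem.Chars.startswith_iff] at h
    obtain ⟨t, rfl⟩ := h
    unfold pvBGo
    simp [pvALoop, PySem.Chars.startswith_iff]
  | case2 cs h hd =>
    rw [pv_splitOn_amp]
    rw [PySem.Chars.startswith_iff] at h
    obtain ⟨t, rfl⟩ := h
    unfold pvBGo
    simp [pvALoop, PySem.Chars.startswith_iff]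
  | case3 cs h hd =>
    have hx : PySem.Chars.startswith (List.takeWhile (fun x => x != '&') cs)
        ['$', 'r', 'i', 'd', '='] = false := by
      rw [Bool.eq_false_iff]
      intro hc
      apply h
      rw [PySem.Chars.startswith_iff] at hc ⊢
      exact hc.trans (List.takeWhile_prefix _)
    rw [pv_splitOn_amp]
    unfold pvBGo
    simp [pvALoop, hx, h, hd]
    split <;> simp_all
  | case4 cs h c rest hm ih =>
    have hx : PySem.Chars.startswith (List.takeWhile (fun x => x != '&') cs)
        ['$', 'r', 'i', 'd', '='] = false := by
      rw [Bool.eq_false_iff]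
      intro hc
      apply h
      rw [PySem.Chars.startswith_iff] at hc ⊢
      exact hc.trans (List.takeWhile_prefix _)
    rw [pv_splitOn_amp]
    unfold pvBGo
    simp [pvALoop, hx, h, hm, ih]
    split <;> simp_all

-- ===== VERDICT (by name: the statement is the Claim_ definition above) =====
theorem parse_request_id_from_topic_spec : Claim_equal_parse_request_id_from_topic := by
  intro topic _
  unfold Spec_parse_request_id_from_topic parse_request_id_from_topic parse_request_id_from_topic_alt
  simp only []
  split
  · rfl
  · rw [pv_key]
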